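-- pv_equiv track=rewrite | github.com/splinterbyte/lessons | module_2_hard.py | make_encrypt
-- ===== SOURCE A (Python) =====
-- def make_encrypt(num):
--     result = ""
--     pairs = []
--     for i in range(1, 21):
--         for j in range(1, 21):
--             if i != j and num % (i + j) == 0:
--                 pair = (i, j)
--                 if pair not in pairs and (j, i) not in pairs:
--                     pairs.append(pair)
--     for pair in pairs:
--         result += str(pair[0]) + str(pair[1])
--     return result
-- ===== SOURCE B (Python) =====
-- def make_encrypt(num):
--     sums = [s for s in range(3, 40) if num % s == 0]
--     parts = []
--     for i in range(1, 21):
--         for s in sums: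
--             j = s - i
--             if j > i and j <= 20:
--                 parts.append(str(i) + str(j))
--     return "".join(parts)
-- ===== Notes on version B (the rewrite author's own statement) =====
-- stated objective: alternative
-- what changed: Instead of scanning every ordered (i,j) pair over the full twenty-by-twenty grid and deduplicating against a growing pairs list, B computes once which candidate sums s between three and thirty-nine divide num and then emits each qualifying pair (i, s-i) directly, with no dedup list and no membership tests.
import Mathlib
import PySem

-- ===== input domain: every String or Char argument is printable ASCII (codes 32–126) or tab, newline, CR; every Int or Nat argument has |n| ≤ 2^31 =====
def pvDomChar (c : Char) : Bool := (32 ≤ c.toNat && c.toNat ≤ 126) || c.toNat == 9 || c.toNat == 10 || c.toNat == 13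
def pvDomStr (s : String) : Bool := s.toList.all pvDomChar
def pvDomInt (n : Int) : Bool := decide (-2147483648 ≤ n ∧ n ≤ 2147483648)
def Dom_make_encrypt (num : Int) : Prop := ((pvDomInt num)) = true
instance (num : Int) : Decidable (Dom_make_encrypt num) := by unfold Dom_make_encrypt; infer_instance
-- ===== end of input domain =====

-- B enumerates the candidate divisor sums s = i+j (3..39) once, keeps those dividing num, and
-- generates each qualifying pair (i, s-i) directly — no 400-iteration double scan over pairs and
-- no dedup list with its membership tests.  Objective: alternative decomposition.

-- ===== PORT A =====
def make_encrypt (num : Int) : String :=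
  let pairs : List (Int × Int) :=
    (PySem.List.pyRange 1 21).foldl (fun pairs i =>
      (PySem.List.pyRange 1 21).foldl (fun pairs j =>
        if i ≠ j ∧ PySem.Int.mod num (i + j) = 0 then
          if (i, j) ∉ pairs ∧ (j, i) ∉ pairs then pairs ++ [(i, j)] else pairs
        else pairs) pairs) []
  pairs.foldl (fun result pair => result ++ (PySem.Int.toStr pair.1 ++ PySem.Int.toStr pair.2)) ""

-- ===== PORT B =====
def make_encrypt_alt (num : Int) : String :=
  let sums : List Int := (PySem.List.pyRange 3 40).filter (fun s => decide (PySem.Int.mod num s = 0))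
  let parts : List String :=
    (PySem.List.pyRange 1 21).foldl (fun parts i =>
      sums.foldl (fun parts s =>
        let j := s - i
        if j > i ∧ j ≤ 20 then parts ++ [PySem.Int.toStr i ++ PySem.Int.toStr j] else parts) parts) []
  PySem.Str.join "" parts

-- ===== PRECONDITION & SPEC =====
def Spec_make_encrypt (num : Int) (out : String) : Prop := out = make_encrypt_alt num
instance (num : Int) (out : String) : Decidable (Spec_make_encrypt num out) := by unfold Spec_make_encrypt; infer_instance

-- ===== CLAIM (what is proved, stated in full; the proofs are below) =====
def Claim_equal_make_encrypt : Prop := ∀ (num : Int), Dom_make_encrypt num → Spec_make_encrypt num (make_encrypt num)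

-- ===== LEMMAS AND PROOFS =====

-- the partners j of a fixed i (i < j ≤ 20, (i+j) divides num), ascending
def pvRow (num i : Int) : List Int :=
  (PySem.List.pyRange (i + 1) 21).filter (fun j => decide (PySem.Int.mod num (i + j) = 0))

-- the partial row: partners found so far, j < t
def pvRow' (num i t : Int) : List Int :=
  (PySem.List.pyRange (i + 1) t).filter (fun j => decide (PySem.Int.mod num (i + j) = 0))

-- all pairs A has appended after finishing outer iterations 1..t-1, in A's emission order
def pvAll (num t : Int) : List (Int × Int) :=
  (PySem.List.pyRange 1 t).flatMap (fun a => (pvRow num a).map (fun b => (a, b)))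

-- A's inner-loop body and outer-loop body, named
def pvInner (num i : Int) (pairs : List (Int × Int)) (j : Int) : List (Int × Int) :=
  if i ≠ j ∧ PySem.Int.mod num (i + j) = 0 then
    if (i, j) ∉ pairs ∧ (j, i) ∉ pairs then pairs ++ [(i, j)] else pairs
  else pairs

def pvOuter (num : Int) (pairs : List (Int × Int)) (i : Int) : List (Int × Int) :=
  (PySem.List.pyRange 1 21).foldl (pvInner num i) pairs

def pvStrOf (p : Int × Int) : String := PySem.Int.toStr p.1 ++ PySem.Int.toStr p.2

lemma mem_pvRow {num i j : Int} :
    j ∈ pvRow num i ↔ i < j ∧ j ≤ 20 ∧ PySem.Int.mod num (i + j) = 0 := by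
  simp [pvRow, List.mem_filter, PySem.List.mem_pyRange_one]
  omega

lemma mem_pvRow' {num i t j : Int} :
    j ∈ pvRow' num i t ↔ i < j ∧ j < t ∧ PySem.Int.mod num (i + j) = 0 := by
  simp [pvRow', List.mem_filter, PySem.List.mem_pyRange_one]
  omega

lemma mem_pvAll {num t a b : Int} :
    (a, b) ∈ pvAll num t ↔ 1 ≤ a ∧ a < t ∧ a < b ∧ b ≤ 20 ∧ PySem.Int.mod num (a + b) = 0 := by
  simp [pvAll, List.mem_flatMap, PySem.List.mem_pyRange_one, mem_pvRow]
  omega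

lemma pvAll_succ (num t : Int) (ht : 1 ≤ t) :
    pvAll num (t + 1) = pvAll num t ++ (pvRow num t).map (fun b => (t, b)) := by
  unfold pvAll
  rw [PySem.List.pyRange_one_succ_right ht, List.flatMap_append]
  simp

lemma pvFoldl_id {α β : Type} (f : β → α → β) (a : β) (l : List α) (h : ∀ x ∈ l, f a x = a) :
    l.foldl f a = a := by
  induction l with
  | nil => rfl
  | cons x xs ih =>
      rw [List.foldl_cons, h x (by simp)]
      exact ih (fun y hy => h y (by simp [hy]))

-- inner-loop steps with j ≤ i leave the accumulated pair list unchanged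
lemma pvInner_le (num i j : Int) (h1 : 1 ≤ j) (hj : j ≤ i) (hi : i ≤ 20) :
    pvInner num i (pvAll num i) j = pvAll num i := by
  unfold pvInner
  by_cases hij : i = j
  · simp [hij]
  · by_cases hm : PySem.Int.mod num (i + j) = 0
    · have hmem : (j, i) ∈ pvAll num i :=
        mem_pvAll.mpr ⟨h1, by omega, by omega, hi, by rwa [add_comm]⟩
      simp [hij, hm, hmem]
    · simp [hij, hm]

-- inner-loop steps with i < j append exactly the qualifying partners, in order
lemma pvPhase3 (num i : Int) :
    ∀ (k : Nat) (t : Int), i < t → t + k = 21 →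
    (PySem.List.pyRange t 21).foldl (pvInner num i)
        (pvAll num i ++ (pvRow' num i t).map (fun b => (i, b)))
      = pvAll num i ++ (pvRow num i).map (fun b => (i, b)) := by
  intro k
  induction k with
  | zero =>
      intro t ht h21
      have : t = 21 := by omega
      subst this
      rw [show PySem.List.pyRange 21 21 = [] by simp [PySem.List.pyRange]]
      rfl
  | succ k ih =>
      intro t ht h21
      rw [PySem.List.pyRange_one_cons (by omega : t < 21), List.foldl_cons]
      have hrow : pvRow' num i (t + 1)
          = pvRow' num i t ++ (if PySem.Int.mod num (i + t) = 0 then [t] else []) := by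
        unfold pvRow'
        rw [PySem.List.pyRange_one_succ_right (by omega : i + 1 ≤ t), List.filter_append]
        by_cases hm : PySem.Int.mod num (i + t) = 0 <;> simp [hm]
      have hstep : pvInner num i (pvAll num i ++ (pvRow' num i t).map (fun b => (i, b))) t
          = pvAll num i ++ (pvRow' num i (t + 1)).map (fun b => (i, b)) := by
        unfold pvInner
        by_cases hm : PySem.Int.mod num (i + t) = 0
        · have hne : i ≠ t := by omega
          have h1 : (i, t) ∉ pvAll num i ++ (pvRow' num i t).map (fun b => (i, b)) := by
            intro hmem
            rcases List.mem_append.mp hmem with h | h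
            · exact absurd (mem_pvAll.mp h).2.1 (by omega)
            · rcases List.mem_map.mp h with ⟨b, hb, hb2⟩
              rw [Prod.mk.injEq] at hb2
              have hbt : b < t := (mem_pvRow'.mp hb).2.1
              omega
          have h2 : (t, i) ∉ pvAll num i ++ (pvRow' num i t).map (fun b => (i, b)) := by
            intro hmem
            rcases List.mem_append.mp hmem with h | h
            · exact absurd (mem_pvAll.mp h).2.1 (by omega)
            · rcases List.mem_map.mp h with ⟨b, hb, hb2⟩
              rw [Prod.mk.injEq] at hb2
              omega
          rw [if_pos ⟨hne, hm⟩, if_pos ⟨h1, h2⟩, hrow]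
          simp [hm]
        · rw [if_neg (by tauto), hrow]
          simp [hm]
      rw [hstep]
      exact ih (t + 1) (by omega) (by omega)

lemma pvOuterStep (num t : Int) (h1 : 1 ≤ t) (h2 : t ≤ 20) :
    pvOuter num (pvAll num t) t = pvAll num (t + 1) := by
  unfold pvOuter
  rw [PySem.List.pyRange_one_append 1 (t + 1) 21 (by omega) (by omega), List.foldl_append]
  rw [pvFoldl_id (pvInner num t) (pvAll num t) _
        (fun j hj => by
          have := PySem.List.mem_pyRange_one.mp hj
          exact pvInner_le num t j (by omega) (by omega) h2)]
  have hrow0 : pvRow' num t (t + 1) = [] := by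
    unfold pvRow'
    rw [show PySem.List.pyRange (t + 1) (t + 1) = [] by simp [PySem.List.pyRange]]
    rfl
  have := pvPhase3 num t (21 - (t + 1)).toNat (t + 1) (by omega) (by omega)
  rw [hrow0] at this
  simp only [List.map_nil, List.append_nil] at this
  rw [this, ← pvAll_succ num t h1]

lemma pvOuterFold (num : Int) :
    ∀ (k : Nat) (t : Int), 1 ≤ t → t + k = 21 →
    (PySem.List.pyRange t 21).foldl (pvOuter num) (pvAll num t) = pvAll num 21 := by
  intro k
  induction k with
  | zero =>
      intro t h1 h21
      have : t = 21 := by omega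
      subst this
      rw [show PySem.List.pyRange 21 21 = [] by simp [PySem.List.pyRange]]
      rfl
  | succ k ih =>
      intro t h1 h21
      rw [PySem.List.pyRange_one_cons (by omega : t < 21), List.foldl_cons,
          pvOuterStep num t h1 (by omega)]
      exact ih (t + 1) (by omega) (by omega)

-- A's pair list is exactly pvAll num 21
lemma pvPairs (num : Int) :
    (PySem.List.pyRange 1 21).foldl (pvOuter num) [] = pvAll num 21 := by
  have h0 : pvAll num 1 = [] := by
    unfold pvAll
    rw [show PySem.List.pyRange 1 1 = [] by simp [PySem.List.pyRange]]
    rfl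
  have := pvOuterFold num 20 1 (by omega) (by omega)
  rwa [h0] at this

-- Prop-ite version of PySem.List.foldl_append_if
lemma pvFoldl_append_ite {α β : Type} (p : α → Prop) [DecidablePred p] (f : α → β)
    (l : List α) (acc : List β) :
    l.foldl (fun acc x => if p x then acc ++ [f x] else acc) acc
      = acc ++ (l.filter (fun x => decide (p x))).map f := by
  rw [← PySem.List.foldl_append_if (fun x => decide (p x)) f l acc]
  apply PySem.List.foldl_congr_mem
  intro acc x _
  by_cases h : p x <;> simp [h]

lemma pvRange_map_sub (i : Int) :
    ∀ (k : Nat) (a b : Int), a + k = b →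
    (PySem.List.pyRange a b).map (fun s => s - i) = PySem.List.pyRange (a - i) (b - i) := by
  intro k
  induction k with
  | zero =>
      intro a b h
      have : a = b := by omega
      subst this
      simp [PySem.List.pyRange]
  | succ k ih =>
      intro a b h
      rw [PySem.List.pyRange_one_cons (by omega : a < b),
          PySem.List.pyRange_one_cons (by omega : a - i < b - i), List.map_cons,
          ih (a + 1) b (by omega)]
      norm_num
      congr 1
      omega

-- restricting the shifted sum range to the window (i, 20] gives exactly pvRow
lemma pvWindow (num i : Int) (h1 : 1 ≤ i) (h2 : i ≤ 20) :
    (PySem.List.pyRange (3 - i) (40 - i)).filter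
        (fun j => decide (j > i ∧ j ≤ 20) && decide (PySem.Int.mod num (i + j) = 0))
      = pvRow num i := by
  by_cases hi : i ≤ 19
  · rw [PySem.List.pyRange_one_append (3 - i) (i + 1) (40 - i) (by omega) (by omega),
        PySem.List.pyRange_one_append (i + 1) 21 (40 - i) (by omega) (by omega),
        List.filter_append, List.filter_append]
    have hlo : (PySem.List.pyRange (3 - i) (i + 1)).filter
        (fun j => decide (j > i ∧ j ≤ 20) && decide (PySem.Int.mod num (i + j) = 0)) = [] := by
      apply List.filter_eq_nil_iff.mpr
      intro j hj
      have := PySem.List.mem_pyRange_one.mp hj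
      have hno : ¬ (j > i ∧ j ≤ 20) := by omega
      simp [hno]
    have hhi : (PySem.List.pyRange 21 (40 - i)).filter
        (fun j => decide (j > i ∧ j ≤ 20) && decide (PySem.Int.mod num (i + j) = 0)) = [] := by
      apply List.filter_eq_nil_iff.mpr
      intro j hj
      have := PySem.List.mem_pyRange_one.mp hj
      have hno : ¬ (j > i ∧ j ≤ 20) := by omega
      simp [hno]
    have hmid : (PySem.List.pyRange (i + 1) 21).filter
        (fun j => decide (j > i ∧ j ≤ 20) && decide (PySem.Int.mod num (i + j) = 0))
        = pvRow num i := by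
      unfold pvRow
      apply List.filter_congr
      intro j hj
      have := PySem.List.mem_pyRange_one.mp hj
      have hyes : j > i ∧ j ≤ 20 := by omega
      simp [hyes]
    rw [hlo, hhi, hmid]
    simp
  · have hi20 : i = 20 := by omega
    subst hi20
    have hlhs : (PySem.List.pyRange (3 - 20) (40 - 20)).filter
        (fun j => decide (j > 20 ∧ j ≤ 20) && decide (PySem.Int.mod num (20 + j) = 0)) = [] := by
      apply List.filter_eq_nil_iff.mpr
      intro j _
      have hno : ¬ (j > 20 ∧ j ≤ 20) := by omega
      simp [hno]
    rw [hlhs]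
    unfold pvRow
    rw [show PySem.List.pyRange (20 + 1) 21 = [] by simp [PySem.List.pyRange]]
    rfl

-- B's inner loop over the divisor sums produces exactly row i's strings
lemma pvSumsRow (num i : Int) (h1 : 1 ≤ i) (h2 : i ≤ 20) :
    (((PySem.List.pyRange 3 40).filter (fun s => decide (PySem.Int.mod num s = 0))).filter
        (fun s => decide (s - i > i ∧ s - i ≤ 20))).map
      (fun s => PySem.Int.toStr i ++ PySem.Int.toStr (s - i))
      = (pvRow num i).map (fun b => pvStrOf (i, b)) := by
  rw [List.filter_filter]
  have hpred : ∀ s ∈ PySem.List.pyRange 3 40,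
      (decide (s - i > i ∧ s - i ≤ 20) && decide (PySem.Int.mod num s = 0))
        = ((fun j => decide (j > i ∧ j ≤ 20) && decide (PySem.Int.mod num (i + j) = 0))
            ((fun s => s - i) s)) := by
    intro s _
    have : i + (s - i) = s := by omega
    simp [this]
  rw [List.filter_congr hpred]
  show ((PySem.List.pyRange 3 40).filter
      ((fun j => decide (j > i ∧ j ≤ 20) && decide (PySem.Int.mod num (i + j) = 0)) ∘
        (fun s => s - i))).map
      ((fun j => PySem.Int.toStr i ++ PySem.Int.toStr j) ∘ (fun s => s - i))
      = (pvRow num i).map (fun b => pvStrOf (i, b))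
  rw [← List.map_map, ← List.filter_map, pvRange_map_sub i 37 3 40 (by norm_num),
      pvWindow num i h1 h2]
  rfl

lemma pvJoin_cons (x : String) (xs : List String) :
    PySem.Str.join "" (x :: xs) = x ++ PySem.Str.join "" xs := by
  apply String.toList_inj.mp
  rw [String.toList_append, PySem.Str.toList_join, PySem.Str.toList_join]
  cases xs with
  | nil => simp [PySem.Chars.join_singleton, PySem.Chars.join_nil]
  | cons y ys =>
      rw [List.map_cons, List.map_cons, PySem.Chars.join_cons_cons]
      simp

lemma pvFoldl_join {α : Type} (f : α → String) (L : List α) :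
    ∀ r : String, L.foldl (fun r x => r ++ f x) r = r ++ PySem.Str.join "" (L.map f) := by
  induction L with
  | nil =>
      intro r
      rw [List.foldl_nil, List.map_nil,
          show PySem.Str.join "" [] = "" by decide, String.append_empty]
  | cons x xs ih =>
      intro r
      rw [List.foldl_cons, ih, List.map_cons, pvJoin_cons, ← String.append_assoc]

lemma pvA_eq (num : Int) :
    make_encrypt num = "" ++ PySem.Str.join "" ((pvAll num 21).map pvStrOf) := by
  simp only [make_encrypt]
  rw [show (fun (pairs : List (Int × Int)) (i : Int) =>
        (PySem.List.pyRange 1 21).foldl (fun pairs j =>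
          if i ≠ j ∧ PySem.Int.mod num (i + j) = 0 then
            if (i, j) ∉ pairs ∧ (j, i) ∉ pairs then pairs ++ [(i, j)] else pairs
          else pairs) pairs) = pvOuter num from rfl]
  rw [pvPairs num]
  rw [show (fun (result : String) (pair : Int × Int) =>
        result ++ (PySem.Int.toStr pair.1 ++ PySem.Int.toStr pair.2))
      = (fun r p => r ++ pvStrOf p) from rfl]
  exact pvFoldl_join pvStrOf (pvAll num 21) ""

lemma pvB_eq (num : Int) :
    make_encrypt_alt num = PySem.Str.join "" ((pvAll num 21).map pvStrOf) := by
  simp only [make_encrypt_alt]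
  congr 1
  rw [PySem.List.foldl_congr_mem _ _
        (fun parts i => parts ++
          ((((PySem.List.pyRange 3 40).filter (fun s => decide (PySem.Int.mod num s = 0))).filter
              (fun s => decide (s - i > i ∧ s - i ≤ 20))).map
            (fun s => PySem.Int.toStr i ++ PySem.Int.toStr (s - i)))) []
        (fun parts i _ => pvFoldl_append_ite
          (fun s => s - i > i ∧ s - i ≤ 20)
          (fun s => PySem.Int.toStr i ++ PySem.Int.toStr (s - i)) _ parts)]
  rw [PySem.List.foldl_append_eq_flatMap, List.nil_append]
  rw [List.flatMap_congr (fun i hi => by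
        have := PySem.List.mem_pyRange_one.mp hi
        exact pvSumsRow num i (by omega) (by omega))]
  unfold pvAll
  rw [List.map_flatMap]
  exact List.flatMap_congr (fun a _ => by rw [List.map_map]; rfl)

theorem make_encrypt_spec : Claim_equal_make_encrypt := by
  intro num _
  unfold Spec_make_encrypt
  rw [pvA_eq num, pvB_eq num, String.empty_append]
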